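-- pv_equiv track=rewrite | github.com/ke1rro/tt-wavelet | scripts/check_runtime_args_capacity.py | max_predict_update_segment_steps
-- ===== SOURCE A (Python) =====
-- from typing import Any
--
-- PU_STEP_TYPES = {"predict", "update"}
--
-- def max_predict_update_segment_steps(steps: list[dict[str, Any]]) -> int:
--     max_count = 0
--     current_count = 0
--     for step in steps:
--         step_type = str(step.get("type", "")).strip()
--         if step_type in PU_STEP_TYPES:
--             current_count += 1
--             if current_count > max_count:
--                 max_count = current_count
--             continue
--
--         # swap is a logical remap and does not break the PU segment.
--         if step_type == "swap":
--             continue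
--
--         # scale and any other non-PU step terminate current PU segment.
--         current_count = 0
--
--     return max_count
-- ===== SOURCE B (Python) =====
-- PU_STEP_TYPES = {"predict", "update"}
--
-- def max_predict_update_segment_steps(steps):
--     # Phase 1: normalized types; Phase 2: group into segments (swap stays inside
--     # a segment); Phase 3: count PU steps per segment and take the max.
--     types = [str(step.get("type", "")).strip() for step in steps]
--     segments = []
--     current = []
--     for t in types:
--         if t in PU_STEP_TYPES or t == "swap":
--             current.append(t)
--         else:
--             segments.append(current)
--             current = []
--     segments.append(current)
--     return max((sum(1 for t in seg if t in PU_STEP_TYPES) for seg in segments), default=0)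
-- ===== Notes on version B (the rewrite author's own statement) =====
-- stated objective: alternative
-- what changed: B is two-phase: it first normalizes types, splits the sequence into segments at terminator steps (swap kept transparent), then counts predict/update steps per segment and aggregates with max(..., default=0), instead of A's single scan with an inline running maximum.
import Mathlib
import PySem

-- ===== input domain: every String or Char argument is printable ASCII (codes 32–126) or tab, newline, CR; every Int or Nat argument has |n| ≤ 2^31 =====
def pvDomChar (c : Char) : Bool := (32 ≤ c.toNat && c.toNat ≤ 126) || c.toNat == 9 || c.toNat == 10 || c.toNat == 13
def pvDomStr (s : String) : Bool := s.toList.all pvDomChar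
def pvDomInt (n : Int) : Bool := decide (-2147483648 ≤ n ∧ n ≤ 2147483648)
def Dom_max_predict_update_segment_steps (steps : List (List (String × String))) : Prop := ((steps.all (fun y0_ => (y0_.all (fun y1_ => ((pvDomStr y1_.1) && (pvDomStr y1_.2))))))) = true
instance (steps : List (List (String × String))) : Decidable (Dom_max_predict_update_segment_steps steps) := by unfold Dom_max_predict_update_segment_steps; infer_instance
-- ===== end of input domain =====

-- B computes the list of per-segment predict/update counts in two phases (normalize types, split
-- into segments at terminators, count and take max) instead of A's single scan with an inline
-- running maximum; objective: alternative decomposition, same O(n) cost.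

-- ===== PORT A =====
def PU_STEP_TYPES : PySem.Set String := PySem.Set.ofList ["predict", "update"]

-- A's loop: for step in steps with state (max_count, current_count).
-- str(step.get("type","")) : values are already strings, so str() is the identity.
def pvGoA : List (List (String × String)) → Int → Int → Int
  | [], max_count, _ => max_count
  | step :: rest, max_count, current_count =>
    let step_type := PySem.Str.strip (PySem.Dict.getD (PySem.Dict.mk step) "type" "")
    if PySem.Set.contains PU_STEP_TYPES step_type then
      let current_count := current_count + 1
      let max_count := if current_count > max_count then current_count else max_count
      pvGoA rest max_count current_count
    else if step_type = "swap" then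
      pvGoA rest max_count current_count
    else
      pvGoA rest max_count 0

def max_predict_update_segment_steps (steps : List (List (String × String))) : Int :=
  pvGoA steps 0 0

-- ===== PORT B =====
-- Phase 2 loop of Source B: split the type list into segments of PU/"swap" runs.
def pvSegsB : List String → List (List String) → List String → List (List String)
  | [], segments, current => segments ++ [current]
  | t :: ts, segments, current =>
    if PySem.Set.contains PU_STEP_TYPES t ∨ t = "swap" then
      pvSegsB ts segments (current ++ [t])
    else
      pvSegsB ts (segments ++ [current]) []

def max_predict_update_segment_steps_alt (steps : List (List (String × String))) : Int :=
  let types := steps.map (fun step => PySem.Str.strip (PySem.Dict.getD (PySem.Dict.mk step) "type" ""))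
  let segments := pvSegsB types [] []
  let counts := segments.map (fun seg =>
    ((seg.filter (fun t => PySem.Set.contains PU_STEP_TYPES t)).length : Int))
  (PySem.List.max? counts (fun x => x)).getD 0

-- ===== PRECONDITION & SPEC =====
def Spec_max_predict_update_segment_steps (steps : List (List (String × String))) (out : Int) : Prop := out = max_predict_update_segment_steps_alt steps
instance (steps : List (List (String × String))) (out : Int) : Decidable (Spec_max_predict_update_segment_steps steps out) := by unfold Spec_max_predict_update_segment_steps; infer_instance

-- ===== CLAIM (what is proved, stated in full; the proofs are below) =====
def Claim_equal_max_predict_update_segment_steps : Prop := ∀ (steps : List (List (String × String))), Dom_max_predict_update_segment_steps steps → Spec_max_predict_update_segment_steps steps (max_predict_update_segment_steps steps)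

-- ===== LEMMAS AND PROOFS =====

-- predicate shorthand
def pvPU (t : String) : Bool := PySem.Set.contains PU_STEP_TYPES t

-- counts of PU steps per segment, first segment starting from c
def pvCnt : List String → Int → List Int
  | [], c => [c]
  | t :: ts, c =>
    if pvPU t then pvCnt ts (c + 1)
    else if t = "swap" then pvCnt ts c
    else c :: pvCnt ts 0

-- max of a nonempty counts list, written as running foldl max from the head
def pvListMax : List Int → Int
  | [] => 0
  | x :: xs => xs.foldl max x

theorem pvFoldlMax_init (l : List Int) (a b : Int) :
    List.foldl max (max a b) l = max a (List.foldl max b l) := by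
  induction l generalizing b with
  | nil => rfl
  | cons y ys ih => rw [List.foldl_cons, max_assoc, ih, List.foldl_cons]

theorem pvListMax_cons (c : Int) (l : List Int) (h : l ≠ []) :
    pvListMax (c :: l) = max c (pvListMax l) := by
  cases l with
  | nil => exact absurd rfl h
  | cons x xs => simp only [pvListMax, List.foldl_cons]; exact pvFoldlMax_init xs c x

theorem pvCnt_ne_nil (ts : List String) (c : Int) : pvCnt ts c ≠ [] := by
  induction ts generalizing c with
  | nil => simp [pvCnt]
  | cons t ts ih =>
    simp only [pvCnt]
    split_ifs <;> simp [ih]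

theorem pvCnt_le_max (ts : List String) (c : Int) : c ≤ pvListMax (pvCnt ts c) := by
  induction ts generalizing c with
  | nil => simp [pvCnt, pvListMax]
  | cons t ts ih =>
    simp only [pvCnt]
    split_ifs with h1 h2
    · exact le_trans (by omega) (ih (c + 1))
    · exact ih c
    · rw [pvListMax_cons _ _ (pvCnt_ne_nil ts 0)]; exact le_max_left _ _

-- A's loop equals "max of seed with the per-segment counts", under A's loop invariant c ≤ m, 0 ≤ m
theorem pvGoA_eq (steps : List (List (String × String))) (m c : Int) (hm : 0 ≤ m) (hc : c ≤ m) :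
    pvGoA steps m c =
      max m (pvListMax (pvCnt (steps.map (fun step => PySem.Str.strip (PySem.Dict.getD (PySem.Dict.mk step) "type" ""))) c)) := by
  induction steps generalizing m c with
  | nil => simp [pvGoA, pvCnt, pvListMax]; omega
  | cons step rest ih =>
    simp only [pvGoA, List.map_cons, pvCnt, pvPU]
    by_cases h1 : PySem.Set.contains PU_STEP_TYPES (PySem.Str.strip (PySem.Dict.getD (PySem.Dict.mk step) "type" ""))
    · rw [if_pos h1, if_pos h1]
      have hmax : (if c + 1 > m then c + 1 else m) = max m (c + 1) := by omega
      simp only [hmax]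
      rw [ih (max m (c + 1)) (c + 1) (by omega) (by omega)]
      have hx := pvCnt_le_max (rest.map (fun step => PySem.Str.strip (PySem.Dict.getD (PySem.Dict.mk step) "type" ""))) (c + 1)
      omega
    · rw [if_neg h1, if_neg h1]
      by_cases h2 : PySem.Str.strip (PySem.Dict.getD (PySem.Dict.mk step) "type" "") = "swap"
      · rw [if_pos h2, if_pos h2, ih m c hm hc]
      · rw [if_neg h2, if_neg h2, ih m 0 hm hm,
            pvListMax_cons _ _ (pvCnt_ne_nil _ 0)]
        omega

-- B's grouping, mapped through per-segment PU count, yields pvCnt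
theorem pvSegsB_counts (ts : List String) (segments : List (List String)) (current : List String) :
    (pvSegsB ts segments current).map
        (fun seg => ((seg.filter (fun t => PySem.Set.contains PU_STEP_TYPES t)).length : Int)) =
      segments.map (fun seg => ((seg.filter (fun t => PySem.Set.contains PU_STEP_TYPES t)).length : Int)) ++
        pvCnt ts ((current.filter (fun t => PySem.Set.contains PU_STEP_TYPES t)).length : Int) := by
  induction ts generalizing segments current with
  | nil => simp [pvSegsB, pvCnt]
  | cons t ts ih =>
    simp only [pvSegsB, pvCnt, pvPU]
    by_cases h1 : PySem.Set.contains PU_STEP_TYPES t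
    · have hor : PySem.Set.contains PU_STEP_TYPES t ∨ t = "swap" := Or.inl h1
      rw [if_pos hor, if_pos h1, ih]
      simp only [List.filter_append, List.filter_cons, List.filter_nil, h1, if_true,
        List.length_append, List.length_cons, List.length_nil]
      norm_num
    · rw [if_neg h1]
      by_cases h2 : t = "swap"
      · have hsw : ¬ PySem.Set.contains PU_STEP_TYPES t ∧ t = "swap" := ⟨h1, h2⟩
        rw [if_pos (Or.inr h2), if_pos h2, ih]
        simp only [List.filter_append, List.filter_cons, List.filter_nil, h1,
          Bool.false_eq_true, if_false, List.append_nil]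
      · rw [if_neg (by tauto), if_neg h2, ih]
        simp
theorem pvListMax_nonneg_getD (l : List Int) (hne : l ≠ []) :
    (PySem.List.max? l (fun x => x)).getD 0 = pvListMax l := by
  cases l with
  | nil => exact absurd rfl hne
  | cons x xs => rw [PySem.List.max?_id_cons]; rfl

-- ===== VERDICT (by name: the statement is the Claim_ definition above) =====
theorem max_predict_update_segment_steps_spec : Claim_equal_max_predict_update_segment_steps := by
  intro steps _
  show max_predict_update_segment_steps steps = max_predict_update_segment_steps_alt steps
  simp only [max_predict_update_segment_steps, max_predict_update_segment_steps_alt]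
  rw [pvGoA_eq _ 0 0 le_rfl le_rfl, pvSegsB_counts]
  simp only [List.map_nil, List.nil_append, List.filter_nil, List.length_nil, Nat.cast_zero]
  rw [pvListMax_nonneg_getD _ (pvCnt_ne_nil _ 0)]
  have := pvCnt_le_max (steps.map (fun step => PySem.Str.strip (PySem.Dict.getD (PySem.Dict.mk step) "type" ""))) 0
  omega
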